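-- pv_equiv track=rewrite | github.com/LenaBGitHub/overone | HT_13.py | list_sum_nums
-- ===== SOURCE A (Python) =====
-- def list_sum_nums(list_nums):
--     """Из полученного списка чисел создайте список с суммами
-- этих чисел, отсортированными по возрастанию"""
--     ls_sum_nums = []
--     for i in list_nums:
--         sum_i = 0
--         while i != 0:
--             sum_i += i % 10
--             i = i // 10
--         ls_sum_nums.append(sum_i)
--
--     return sorted(ls_sum_nums)
-- ===== SOURCE B (Python) =====
-- def list_sum_nums(list_nums):
--     return sorted(sum(int(d) for d in str(i)) for i in list_nums)
-- ===== Notes on version B (the rewrite author's own statement) =====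
-- stated objective: idiomatic
-- what changed: Digit sums are computed by iterating over the decimal string representation (sum(int(d) for d in str(i))) inside a single sorted(...) generator expression, instead of arithmetic digit peeling with a %10 // 10 while-loop and an explicit accumulator list.
import Mathlib
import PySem

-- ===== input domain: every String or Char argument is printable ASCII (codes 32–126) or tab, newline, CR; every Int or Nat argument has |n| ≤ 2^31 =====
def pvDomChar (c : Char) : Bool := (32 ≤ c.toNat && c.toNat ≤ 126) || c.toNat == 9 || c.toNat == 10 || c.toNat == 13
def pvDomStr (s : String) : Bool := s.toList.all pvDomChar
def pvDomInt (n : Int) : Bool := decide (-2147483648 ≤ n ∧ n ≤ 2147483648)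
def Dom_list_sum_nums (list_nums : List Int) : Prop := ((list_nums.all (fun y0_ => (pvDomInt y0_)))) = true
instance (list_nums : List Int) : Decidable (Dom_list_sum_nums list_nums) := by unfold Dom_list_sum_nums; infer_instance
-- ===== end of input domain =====

-- B computes each digit sum by iterating over str(i) inside one sorted(...) generator
-- expression, instead of A's %10 // 10 while-loop with an explicit accumulator list (idiomatic).


-- ===== PORT A =====
-- the while-loop 'while i != 0: sum_i += i % 10; i = i // 10'; the Nat fuel only
-- makes the recursion total (one unit per iteration; i.natAbs + 1 suffices for 0 ≤ i)
def pvPeelA : Nat → Int → Int → Int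
  | 0, _, sum_i => sum_i
  | fuel + 1, i, sum_i =>
    if i = 0 then sum_i
    else pvPeelA fuel (PySem.Int.floordiv i 10) (sum_i + PySem.Int.mod i 10)

def list_sum_nums (list_nums : List Int) : List Int :=
  let ls_sum_nums := list_nums.foldl (fun acc i => acc ++ [pvPeelA (i.natAbs + 1) i 0]) []
  PySem.List.sorted ls_sum_nums (fun x => x)

-- ===== PORT B =====
-- int(d) for a single decimal digit character d is d.toNat - 48 (exact on digit chars,
-- i.e. on str(i) for 0 ≤ i; negative i are outside Pre_, where Python B raises ValueError)
def list_sum_nums_alt (list_nums : List Int) : List Int :=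
  PySem.List.sorted
    (list_nums.map (fun i => ((PySem.Int.toChars i).map (fun c => ((c.toNat : Int) - 48))).sum))
    (fun x => x)

-- ===== PRECONDITION & SPEC =====
-- Pre_ excludes negative elements: there A's while-loop never terminates (i // 10 stalls at -1),
-- so A returns no value, and Python B raises ValueError on the '-' character.
def Pre_list_sum_nums (list_nums : List Int) : Prop := ∀ i ∈ list_nums, 0 ≤ i
instance (list_nums : List Int) : Decidable (Pre_list_sum_nums list_nums) := by unfold Pre_list_sum_nums; infer_instance
def pvWitness_list_sum_nums : List Int := [10, 0, 235]

def Spec_list_sum_nums (list_nums : List Int) (out : List Int) : Prop := out = list_sum_nums_alt list_nums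
instance (list_nums : List Int) (out : List Int) : Decidable (Spec_list_sum_nums list_nums out) := by unfold Spec_list_sum_nums; infer_instance

-- ===== CLAIM (what is proved, stated in full; the proofs are below) =====
def Claim_equal_list_sum_nums : Prop := ∀ (list_nums : List Int), Dom_list_sum_nums list_nums → Pre_list_sum_nums list_nums → Spec_list_sum_nums list_nums (list_sum_nums list_nums)

-- ===== LEMMAS AND PROOFS =====

-- the common digit sum, by Nat recursion
def pvNatDigitSum : Nat → Nat
  | 0 => 0
  | n + 1 => pvNatDigitSum ((n + 1) / 10) + (n + 1) % 10
decreasing_by exact Nat.div_lt_self (Nat.succ_pos n) (by omega)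

lemma pvNatDigitSum_pos (n : Nat) (h : n ≠ 0) :
    pvNatDigitSum n = pvNatDigitSum (n / 10) + n % 10 := by
  cases n with
  | zero => exact absurd rfl h
  | succ m => rw [pvNatDigitSum]

-- A's loop computes the digit sum (fuel ≥ n suffices)
lemma pvPeelA_eq (f : Nat) : ∀ (n : Nat) (acc : Int), n ≤ f →
    pvPeelA f (n : Int) acc = acc + (pvNatDigitSum n : Int) := by
  induction f with
  | zero =>
    intro n acc h
    interval_cases n
    simp [pvPeelA, pvNatDigitSum]
  | succ f ih =>
    intro n acc h
    by_cases hn : n = 0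
    · subst hn; simp [pvPeelA, pvNatDigitSum]
    · have hcast : ((n : Int) = 0) ↔ (n = 0) := by exact_mod_cast Iff.rfl
      rw [pvPeelA, if_neg (by simpa [hcast] using hn)]
      rw [show PySem.Int.floordiv (n : Int) 10 = ((n / 10 : Nat) : Int) from
            PySem.Int.floordiv_natCast n 10,
          show PySem.Int.mod (n : Int) 10 = ((n % 10 : Nat) : Int) from
            PySem.Int.mod_natCast n 10]
      rw [ih (n / 10) _ (by
        have := Nat.div_lt_self (Nat.pos_of_ne_zero hn) (by omega : (1:Nat) < 10)
        omega)]
      rw [pvNatDigitSum_pos n hn]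
      push_cast; ring

-- each emitted char of toDigitsCore is a decimal digit whose value int(d) recovers
lemma pvDigitChar_val (d : Nat) (h : d < 10) :
    ((Nat.digitChar d).toNat : Int) - 48 = (d : Int) := by
  interval_cases d <;> decide

lemma pvToDigitsCore_succ (b f n : Nat) (ds : List Char) :
    Nat.toDigitsCore b (f + 1) n ds =
      if n / b = 0 then Nat.digitChar (n % b) :: ds
      else Nat.toDigitsCore b f (n / b) (Nat.digitChar (n % b) :: ds) := rfl

-- B's string traversal sums to the digit sum
lemma pvToDigitsCore_sum (f : Nat) : ∀ (n : Nat) (ds : List Char), n < f →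
    ((Nat.toDigitsCore 10 f n ds).map (fun c => ((c.toNat : Int) - 48))).sum
      = (pvNatDigitSum n : Int) + (ds.map (fun c => ((c.toNat : Int) - 48))).sum := by
  induction f with
  | zero => intro n ds h; omega
  | succ f ih =>
    intro n ds h
    rw [pvToDigitsCore_succ]
    have hlt : n % 10 < 10 := Nat.mod_lt _ (by omega)
    by_cases h10 : n / 10 = 0
    · rw [if_pos h10]
      by_cases hn : n = 0
      · subst hn; simp [pvNatDigitSum, pvDigitChar_val 0 (by omega)]
      · rw [pvNatDigitSum_pos n hn, h10]
        simp [pvNatDigitSum, pvDigitChar_val _ hlt]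
    · rw [if_neg h10]
      have hn : n ≠ 0 := by intro h0; subst h0; simp at h10
      have hrec : n / 10 < f := by
        have := Nat.div_lt_self (Nat.pos_of_ne_zero hn) (by omega : (1:Nat) < 10)
        omega
      rw [ih (n / 10) _ hrec]
      rw [pvNatDigitSum_pos n hn]
      simp [pvDigitChar_val _ hlt]
      push_cast; ring

lemma pvStrDigitSum_eq (i : Int) (h : 0 ≤ i) :
    ((PySem.Int.toChars i).map (fun c => ((c.toNat : Int) - 48))).sum
      = (pvNatDigitSum i.toNat : Int) := by
  rw [PySem.Int.toChars, if_neg (by omega), Nat.toDigits]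
  have := pvToDigitsCore_sum (i.toNat + 1) i.toNat [] (by omega)
  simpa using this

-- per-element agreement
lemma pvElem_eq (i : Int) (h : 0 ≤ i) :
    pvPeelA (i.natAbs + 1) i 0
      = ((PySem.Int.toChars i).map (fun c => ((c.toNat : Int) - 48))).sum := by
  rw [pvStrDigitSum_eq i h]
  have h1 : i = ((i.toNat : Nat) : Int) := by omega
  have h2 : i.natAbs = i.toNat := by omega
  rw [h2]
  calc pvPeelA (i.toNat + 1) i 0
      = pvPeelA (i.toNat + 1) ((i.toNat : Nat) : Int) 0 := by rw [← h1]
    _ = 0 + (pvNatDigitSum i.toNat : Int) := pvPeelA_eq _ _ _ (by omega)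
    _ = (pvNatDigitSum i.toNat : Int) := by ring

-- ===== VERDICT (by name: the statement is the Claim_ definition above) =====
theorem list_sum_nums_spec : Claim_equal_list_sum_nums := by
  intro list_nums _ hpre
  unfold Spec_list_sum_nums list_sum_nums list_sum_nums_alt
  simp only
  rw [PySem.List.foldl_append_singleton_eq_map]
  congr 1
  exact List.map_congr_left (fun i hi => pvElem_eq i (hpre i hi))
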